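-- pv_equiv track=rewrite | github.com/ShaniLevi770/WikiPodkids | services/tts.py | _build_ssml
-- ===== SOURCE A (Python) =====
-- def _build_ssml(text: str) -> str:
--     """Convert plain text to SSML with gentle pauses."""
--     safe = (
--         text.replace("&", "&amp;")
--             .replace("<", "&lt;")
--             .replace(">", "&gt;")
--     )
--     # Add short breaks after sentence-ending punctuation
--     safe = (
--         safe.replace("!", "!<break time=\"500ms\"/>")
--             .replace("?", "?<break time=\"500ms\"/>")
--             .replace(".", ".<break time=\"400ms\"/>")
--     )
--     paragraphs = [p for p in safe.split("\n") if p.strip()]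
--     body = "".join(f"<p>{p}</p>" for p in paragraphs)
--     return f"<speak><prosody rate=\"90%\" pitch=\"-2st\">{body}</prosody></speak>"
-- ===== SOURCE B (Python) =====
-- _ESC = {
--     "&": "&amp;",
--     "<": "&lt;",
--     ">": "&gt;",
--     "!": "!<break time=\"500ms\"/>",
--     "?": "?<break time=\"500ms\"/>",
--     ".": ".<break time=\"400ms\"/>",
-- }
--
-- def _build_ssml(text: str) -> str:
--     """Convert plain text to SSML with gentle pauses (single-pass escape)."""
--     safe = "".join(_ESC.get(c, c) for c in text)
--     paragraphs = [p for p in safe.split("\n") if p.strip()]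
--     body = "".join(f"<p>{p}</p>" for p in paragraphs)
--     return f"<speak><prosody rate=\"90%\" pitch=\"-2st\">{body}</prosody></speak>"
-- ===== Notes on version B (the rewrite author's own statement) =====
-- stated objective: idiomatic
-- what changed: The six chained str.replace scans are replaced by a single pass over the original text using a per-character escape table joined into one string; the split/filter/wrap tail is unchanged.
import Mathlib
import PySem

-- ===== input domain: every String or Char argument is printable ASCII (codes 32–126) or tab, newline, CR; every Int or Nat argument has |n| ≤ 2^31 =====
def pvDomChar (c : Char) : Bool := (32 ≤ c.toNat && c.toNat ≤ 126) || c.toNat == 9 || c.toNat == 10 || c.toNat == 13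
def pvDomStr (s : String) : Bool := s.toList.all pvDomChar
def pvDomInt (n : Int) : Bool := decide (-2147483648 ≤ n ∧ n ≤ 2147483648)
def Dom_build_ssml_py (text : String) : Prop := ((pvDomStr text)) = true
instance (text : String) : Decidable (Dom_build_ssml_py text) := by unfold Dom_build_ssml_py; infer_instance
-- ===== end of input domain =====

-- B replaces A's six chained .replace scans by one per-character escape pass; objective: idiomatic single traversal.


-- ===== PORT A =====
def build_ssml_py (text : String) : String :=
  let safe := PySem.Str.replace (PySem.Str.replace (PySem.Str.replace text "&" "&amp;") "<" "&lt;") ">" "&gt;"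
  let safe := PySem.Str.replace (PySem.Str.replace (PySem.Str.replace safe "!" "!<break time=\"500ms\"/>") "?" "?<break time=\"500ms\"/>") "." ".<break time=\"400ms\"/>"
  let paragraphs := ((PySem.Str.split? safe "\n").getD []).filter (fun p => PySem.Str.strip p != "")
  let body := PySem.Str.join "" (paragraphs.map (fun p => "<p>" ++ p ++ "</p>"))
  "<speak><prosody rate=\"90%\" pitch=\"-2st\">" ++ body ++ "</prosody></speak>"

-- ===== PORT B =====
-- per-character escape table (B's _ESC.get(c, c))
def escChar (c : Char) : List Char :=
  if c = '&' then "&amp;".toList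
  else if c = '<' then "&lt;".toList
  else if c = '>' then "&gt;".toList
  else if c = '!' then "!<break time=\"500ms\"/>".toList
  else if c = '?' then "?<break time=\"500ms\"/>".toList
  else if c = '.' then ".<break time=\"400ms\"/>".toList
  else [c]

def build_ssml_py_alt (text : String) : String :=
  let safe := String.ofList (text.toList.flatMap escChar)
  let paragraphs := ((PySem.Str.split? safe "\n").getD []).filter (fun p => PySem.Str.strip p != "")
  let body := PySem.Str.join "" (paragraphs.map (fun p => "<p>" ++ p ++ "</p>"))
  "<speak><prosody rate=\"90%\" pitch=\"-2st\">" ++ body ++ "</prosody></speak>"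

-- ===== PRECONDITION & SPEC =====
def Spec_build_ssml_py (text : String) (out : String) : Prop := out = build_ssml_py_alt text
instance (text : String) (out : String) : Decidable (Spec_build_ssml_py text out) := by unfold Spec_build_ssml_py; infer_instance

-- ===== CLAIM (what is proved, stated in full; the proofs are below) =====
def Claim_equal_build_ssml_py : Prop := ∀ (text : String), Dom_build_ssml_py text → Spec_build_ssml_py text (build_ssml_py text)

-- ===== LEMMAS AND PROOFS =====

-- Chars.replace with a single-character pattern is a flatMap over the characters.
theorem replace_go_single (c : Char) (r : List Char) :
    ∀ (l acc : List Char) (fuel : Nat), l.length ≤ fuel →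
      PySem.Chars.replace.go [c] r fuel l acc
        = acc.reverse ++ l.flatMap (fun x => if x = c then r else [x]) := by
  intro l
  induction l with
  | nil =>
    intro acc fuel _
    cases fuel <;> simp [PySem.Chars.replace.go]
  | cons x t ih =>
    intro acc fuel hf
    cases fuel with
    | zero => simp at hf
    | succ f =>
      simp only [PySem.Chars.replace.go]
      by_cases hx : x = c
      · subst hx
        have hpre : List.isPrefixOf [x] (x :: t) = true := by simp [List.isPrefixOf]
        rw [if_pos hpre]
        simp only [List.length_cons, List.length_nil, Nat.zero_add, List.drop_succ_cons,
          List.drop_zero]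
        rw [ih (r.reverse ++ acc) f (by simpa using hf)]
        simp
      · have hpre : List.isPrefixOf [c] (x :: t) = false := by
          simp [List.isPrefixOf]; exact fun h => absurd h.symm hx
        rw [if_neg (by simp [hpre])]
        rw [ih (x :: acc) f (by simpa using hf)]
        simp [hx]

theorem replace_single (cs : List Char) (c : Char) (r : List Char) :
    PySem.Chars.replace cs [c] r = cs.flatMap (fun x => if x = c then r else [x]) := by
  simp only [PySem.Chars.replace, List.isEmpty_cons, Bool.false_eq_true, if_false]
  simpa using replace_go_single c r cs [] cs.length le_rfl

-- the six single-character substitutions composed are exactly escChar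
theorem step_comp (x : Char) :
    List.flatMap (fun a => if a = '.' then ".<break time=\"400ms\"/>".toList else [a])
      (List.flatMap (fun a => if a = '?' then "?<break time=\"500ms\"/>".toList else [a])
        (List.flatMap (fun a => if a = '!' then "!<break time=\"500ms\"/>".toList else [a])
          (List.flatMap (fun a => if a = '>' then "&gt;".toList else [a])
            (List.flatMap (fun a => if a = '<' then "&lt;".toList else [a])
              (if x = '&' then "&amp;".toList else [x])))))
      = escChar x := by
  by_cases h1 : x = '&'
  · subst h1; decide
  by_cases h2 : x = '<'
  · subst h2; decide
  by_cases h3 : x = '>'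
  · subst h3; decide
  by_cases h4 : x = '!'
  · subst h4; decide
  by_cases h5 : x = '?'
  · subst h5; decide
  by_cases h6 : x = '.'
  · subst h6; decide
  simp [escChar, h1, h2, h3, h4, h5, h6]

theorem esc_eq (cs : List Char) :
    PySem.Chars.replace (PySem.Chars.replace (PySem.Chars.replace
      (PySem.Chars.replace (PySem.Chars.replace (PySem.Chars.replace
        cs "&".toList "&amp;".toList) "<".toList "&lt;".toList) ">".toList "&gt;".toList)
        "!".toList "!<break time=\"500ms\"/>".toList) "?".toList "?<break time=\"500ms\"/>".toList)
        ".".toList ".<break time=\"400ms\"/>".toList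
      = cs.flatMap escChar := by
  have hAmp : "&".toList = ['&'] := rfl
  have hLt : "<".toList = ['<'] := rfl
  have hGt : ">".toList = ['>'] := rfl
  have hEx : "!".toList = ['!'] := rfl
  have hQu : "?".toList = ['?'] := rfl
  have hDot : ".".toList = ['.'] := rfl
  rw [hAmp, hLt, hGt, hEx, hQu, hDot]
  simp only [replace_single, List.flatMap_assoc]
  induction cs with
  | nil => simp
  | cons x t ih =>
    simp only [List.flatMap_cons]
    rw [ih]
    congr 1
    simpa [List.flatMap_assoc] using step_comp x

-- ===== VERDICT (by name: the statement is the Claim_ definition above) =====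
theorem build_ssml_py_spec : Claim_equal_build_ssml_py := by
  intro text _
  unfold Spec_build_ssml_py build_ssml_py build_ssml_py_alt
  have hsafe :
      PySem.Str.replace (PySem.Str.replace (PySem.Str.replace
        (PySem.Str.replace (PySem.Str.replace (PySem.Str.replace text "&" "&amp;")
          "<" "&lt;") ">" "&gt;") "!" "!<break time=\"500ms\"/>")
          "?" "?<break time=\"500ms\"/>") "." ".<break time=\"400ms\"/>"
        = String.ofList (text.toList.flatMap escChar) := by
    simp only [PySem.Str.replace, String.toList_ofList]
    rw [esc_eq]
  simp only [hsafe]
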